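-- pv_equiv track=rewrite | github.com/joetache4/ProjectEuler | 044_PentagonalNumbers.py | get_pent_nums
-- ===== SOURCE A (Python) =====
-- def get_pent_nums(max):
-- 	n = 1
-- 	while True:
-- 		p = n * (3*n-1) // 2
-- 		if p >= max:
-- 			break
-- 		yield p
-- 		n += 1
-- ===== SOURCE B (Python) =====
-- def get_pent_nums(max):
--     out = []
--     p, step = 1, 4
--     while p < max:
--         out.append(p)
--         p += step
--         step += 3
--     return out
-- ===== Notes on version B (the rewrite author's own statement) =====
-- stated objective: alternative
-- what changed: B replaces the generator that recomputes the closed-form quadratic for every index with a list-building loop that maintains the running pentagonal value and its first difference, advancing by additions only, with the loop condition inverted (while p < max instead of break on p >= max).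
import Mathlib
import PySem

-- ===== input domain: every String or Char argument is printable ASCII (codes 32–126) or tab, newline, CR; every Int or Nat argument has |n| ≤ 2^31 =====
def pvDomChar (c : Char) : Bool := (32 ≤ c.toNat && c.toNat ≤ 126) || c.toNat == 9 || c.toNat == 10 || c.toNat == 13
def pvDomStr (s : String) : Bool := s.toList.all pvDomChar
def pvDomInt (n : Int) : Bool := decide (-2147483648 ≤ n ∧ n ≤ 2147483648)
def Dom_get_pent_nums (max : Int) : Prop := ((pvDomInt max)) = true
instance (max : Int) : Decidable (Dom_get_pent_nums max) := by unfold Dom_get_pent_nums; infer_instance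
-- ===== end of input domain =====

-- B replaces A's per-term closed formula by an additive first-difference recurrence; same sequence, no multiplications.
-- A is a Python generator; it is ported as the list of the values it yields.

-- ===== PORT A =====
-- used by goA's termination proof: the loop index never exceeds the yielded value
theorem pvA_n_le_p (n : Int) : 2 * n ≤ n * (3 * n - 1) := by
  by_cases h : n ≤ 0
  · nlinarith [mul_nonneg (show (0:Int) ≤ -(3 * n) by omega) (show (0:Int) ≤ -(n - 1) by omega)]
  · nlinarith [mul_nonneg (show (0:Int) ≤ 3 * n by omega) (show (0:Int) ≤ n - 1 by omega)]

-- the while-True/break/yield loop of A, indexed by n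
def goA (mx n : Int) : List Int :=
  let p := PySem.Int.floordiv (n * (3 * n - 1)) 2
  if p ≥ mx then []
  else p :: goA mx (n + 1)
termination_by (mx - n).toNat
decreasing_by
  have _hp : PySem.Int.floordiv (n * (3 * n - 1)) 2 < mx := by omega
  
  have hnp : n ≤ PySem.Int.floordiv (n * (3 * n - 1)) 2 := by
    rw [PySem.Int.le_floordiv_iff_mul_le (by norm_num)]
    have := pvA_n_le_p n; omega
  omega

def get_pent_nums (max : Int) : List Int := goA max 1

-- ===== PORT B =====
-- Source B's while loop: running value p and running first difference step
-- (the hypothesis 4 ≤ step is only the termination guarantee; the computation is Source B's loop)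
def goB (mx p step : Int) (h : 4 ≤ step) : List Int :=
  if p < mx then p :: goB mx (p + step) (step + 3) (by omega)
  else []
termination_by (mx - p).toNat
decreasing_by omega

def get_pent_nums_alt (max : Int) : List Int := goB max 1 4 (by norm_num)

-- ===== PRECONDITION & SPEC =====
def Spec_get_pent_nums (max : Int) (out : List Int) : Prop := out = get_pent_nums_alt max
instance (max : Int) (out : List Int) : Decidable (Spec_get_pent_nums max out) := by unfold Spec_get_pent_nums; infer_instance

-- ===== CLAIM (what is proved, stated in full; the proofs are below) =====
def Claim_equal_get_pent_nums : Prop := ∀ (max : Int), Dom_get_pent_nums max → Spec_get_pent_nums max (get_pent_nums max)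

-- ===== LEMMAS AND PROOFS =====
theorem fdiv_two_mul (k : Int) : PySem.Int.floordiv (2 * k) 2 = k := by
  rw [PySem.Int.floordiv_eq_ediv_of_pos (by norm_num)]
  exact Int.mul_ediv_cancel_left k (by norm_num)

-- first-difference recurrence of the pentagonal numbers, through Python's //
theorem pent_succ (n : Int) :
    PySem.Int.floordiv ((n + 1) * (3 * (n + 1) - 1)) 2
      = PySem.Int.floordiv (n * (3 * n - 1)) 2 + (3 * n + 1) := by
  rcases Int.even_or_odd n with ⟨m, hm⟩ | ⟨m, hm⟩
  · rw [show (n + 1) * (3 * (n + 1) - 1) = 2 * ((2 * m + 1) * (3 * m + 1)) by rw [hm]; ring,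
        show n * (3 * n - 1) = 2 * (m * (6 * m - 1)) by rw [hm]; ring,
        fdiv_two_mul, fdiv_two_mul, hm]
    ring
  · rw [show (n + 1) * (3 * (n + 1) - 1) = 2 * ((m + 1) * (6 * m + 5)) by rw [hm]; ring,
        show n * (3 * n - 1) = 2 * ((2 * m + 1) * (3 * m + 1)) by rw [hm]; ring,
        fdiv_two_mul, fdiv_two_mul, hm]
    ring

theorem goB_congr (mx p p' s s' : Int) (hp : p = p') (hs : s = s') (h : 4 ≤ s) :
    goB mx p s h = goB mx p' s' (hs ▸ h) := by subst hp; subst hs; rfl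

theorem pvKey (mx n : Int) (h : (4:Int) ≤ 3 * n + 1) :
    goA mx n = goB mx (PySem.Int.floordiv (n * (3 * n - 1)) 2) (3 * n + 1) h := by
  rw [goA, goB]
  simp only [ge_iff_le]
  by_cases hp : mx ≤ PySem.Int.floordiv (n * (3 * n - 1)) 2
  · rw [if_pos hp, if_neg (not_lt.mpr hp)]
  · rw [if_neg hp, if_pos (not_le.mp hp)]
    refine congrArg _ ?_
    rw [pvKey mx (n + 1) (by omega)]
    exact goB_congr mx _ _ (3 * (n + 1) + 1) (3 * n + 1 + 3) (pent_succ n) (by ring) _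
termination_by (mx - n).toNat
decreasing_by
  have hnp : n ≤ PySem.Int.floordiv (n * (3 * n - 1)) 2 := by
    rw [PySem.Int.le_floordiv_iff_mul_le (by norm_num)]
    have := pvA_n_le_p n; omega
  omega

-- ===== VERDICT (by name: the statement is the Claim_ definition above) =====
theorem get_pent_nums_spec : Claim_equal_get_pent_nums := by
  intro mx _
  unfold Spec_get_pent_nums get_pent_nums get_pent_nums_alt
  rw [pvKey mx 1 (by norm_num)]
  exact goB_congr mx _ _ _ _ (by decide) (by norm_num) _
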